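-- pv_equiv track=rewrite | github.com/geraljdl-cpu/ai-os | agents/coding/reviewer.py | _parse_decision
-- ===== SOURCE A (Python) =====
-- def _parse_decision(response: str) -> tuple[str, list[str]]:
--     """
--     Parse reviewer response into (decision, reasons).
--     decision: "APPROVE" | "REJECT" | "UNKNOWN"
--     """
--     lines = response.strip().splitlines()
--     decision = "UNKNOWN"
--     reasons = []
--     in_reasons = False
--
--     for line in lines:
--         stripped = line.strip()
--         if stripped.upper().startswith("DECISION:"):
--             d = stripped.split(":", 1)[1].strip().upper()
--             if "APPROVE" in d:
--                 decision = "APPROVE"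
--             elif "REJECT" in d:
--                 decision = "REJECT"
--         elif stripped.upper().startswith("REASONS:"):
--             in_reasons = True
--         elif in_reasons and stripped.startswith("-"):
--             reasons.append(stripped[1:].strip())
--
--     # Fallback: if response contains APPROVE/REJECT anywhere
--     if decision == "UNKNOWN":
--         upper = response.upper()
--         if "APPROVE" in upper:
--             decision = "APPROVE"
--         elif "REJECT" in upper:
--             decision = "REJECT"
--
--     return decision, reasons
-- ===== SOURCE B (Python) =====
-- def _parse_decision(response: str) -> tuple[str, list[str]]:
--     lines = [line.strip() for line in response.strip().splitlines()]
--
--     # Pass 1: decision = last DECISION: line whose tail names a verdict.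
--     decision = "UNKNOWN"
--     for s in lines:
--         if s.upper().startswith("DECISION:"):
--             tail = s.split(":", 1)[1].strip().upper()
--             if "APPROVE" in tail:
--                 decision = "APPROVE"
--             elif "REJECT" in tail:
--                 decision = "REJECT"
--     if decision == "UNKNOWN":
--         upper = response.upper()
--         if "APPROVE" in upper:
--             decision = "APPROVE"
--         elif "REJECT" in upper:
--             decision = "REJECT"
--
--     # Pass 2: reasons = dash lines after the first REASONS: marker.
--     idx = next((i for i, s in enumerate(lines) if s.upper().startswith("REASONS:")), None)
--     reasons = [] if idx is None else [s[1:].strip() for s in lines[idx + 1:] if s.startswith("-")]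
--
--     return decision, reasons
-- ===== Notes on version B (the rewrite author's own statement) =====
-- stated objective: alternative
-- what changed: Replaces A's single flag-driven loop carrying (decision, reasons, in_reasons) state by two independent passes: a decision-only fold over DECISION: lines, and slice-based reason extraction (filter+map over the lines after the first REASONS: marker found by index).
import Mathlib
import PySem

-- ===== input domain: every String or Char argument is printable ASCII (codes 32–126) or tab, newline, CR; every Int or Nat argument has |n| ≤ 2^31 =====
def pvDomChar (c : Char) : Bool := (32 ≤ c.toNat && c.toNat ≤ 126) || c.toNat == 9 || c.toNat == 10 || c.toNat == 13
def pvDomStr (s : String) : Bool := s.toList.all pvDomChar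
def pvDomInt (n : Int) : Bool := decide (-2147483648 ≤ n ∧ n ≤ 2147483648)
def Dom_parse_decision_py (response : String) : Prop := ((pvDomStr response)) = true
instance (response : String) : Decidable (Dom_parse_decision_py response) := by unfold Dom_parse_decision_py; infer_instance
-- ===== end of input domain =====

-- B replaces A's single flag-driven loop by two separate passes (a decision-only fold,
-- then slice-based reason extraction after the first REASONS: marker); objective: alternative decomposition.

-- ===== PORT A =====
-- Loop body of A applied to the already-stripped line (A computes `stripped = line.strip()` first).
def pdStepCore (st : String × List String × Bool) (stripped : String) : String × List String × Bool :=
  if PySem.Str.startswith (PySem.Str.upper stripped) "DECISION:" then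
    -- d = stripped.split(":", 1)[1].strip().upper(); the [1] always exists because
    -- `stripped` starts with "DECISION:" case-insensitively, hence contains ':',
    -- so the `.getD ""` default is unreachable (exact on all reachable inputs).
    let d := PySem.Str.upper (PySem.Str.strip
      ((PySem.List.pyGet? ((PySem.Str.splitMax? stripped ":" 1).getD []) 1).getD ""))
    if PySem.Str.isIn "APPROVE" d then ("APPROVE", st.2.1, st.2.2)
    else if PySem.Str.isIn "REJECT" d then ("REJECT", st.2.1, st.2.2)
    else st
  else if PySem.Str.startswith (PySem.Str.upper stripped) "REASONS:" then
    (st.1, st.2.1, true)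
  else if st.2.2 && PySem.Str.startswith stripped "-" then
    (st.1, st.2.1 ++ [PySem.Str.strip (PySem.Str.slice stripped (some 1) none)], st.2.2)
  else st

def pdStepA (st : String × List String × Bool) (line : String) : String × List String × Bool :=
  pdStepCore st (PySem.Str.strip line)

def parse_decision_py (response : String) : String × List String :=
  let lines := PySem.Str.splitlines (PySem.Str.strip response)
  let st := lines.foldl pdStepA ("UNKNOWN", [], false)
  let decision :=
    if st.1 = "UNKNOWN" then
      let upper := PySem.Str.upper response
      if PySem.Str.isIn "APPROVE" upper then "APPROVE"
      else if PySem.Str.isIn "REJECT" upper then "REJECT"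
      else st.1
    else st.1
  (decision, st.2.1)

-- ===== PORT B =====
-- decision pass: fold only the DECISION: lines
def pdDecStep (d : String) (s : String) : String :=
  if PySem.Str.startswith (PySem.Str.upper s) "DECISION:" then
    let tail := PySem.Str.upper (PySem.Str.strip
      ((PySem.List.pyGet? ((PySem.Str.splitMax? s ":" 1).getD []) 1).getD ""))
    if PySem.Str.isIn "APPROVE" tail then "APPROVE"
    else if PySem.Str.isIn "REJECT" tail then "REJECT"
    else d
  else d

-- reasons comprehension: [s[1:].strip() for s in ms if s.startswith("-")]
def pdCollect (ms : List String) : List String :=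
  (ms.filter (fun s => PySem.Str.startswith s "-")).map
    (fun s => PySem.Str.strip (PySem.Str.slice s (some 1) none))

def parse_decision_py_alt (response : String) : String × List String :=
  let lines := (PySem.Str.splitlines (PySem.Str.strip response)).map PySem.Str.strip
  let d0 := lines.foldl pdDecStep "UNKNOWN"
  let decision :=
    if d0 = "UNKNOWN" then
      let upper := PySem.Str.upper response
      if PySem.Str.isIn "APPROVE" upper then "APPROVE"
      else if PySem.Str.isIn "REJECT" upper then "REJECT"
      else d0
    else d0
  let reasons :=
    match lines.findIdx? (fun s => PySem.Str.startswith (PySem.Str.upper s) "REASONS:") with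
    | none => []
    | some i => pdCollect (lines.drop (i + 1))
  (decision, reasons)

-- ===== PRECONDITION & SPEC =====
def Spec_parse_decision_py (response : String) (out : String × List String) : Prop := out = parse_decision_py_alt response
instance (response : String) (out : String × List String) : Decidable (Spec_parse_decision_py response out) := by unfold Spec_parse_decision_py; infer_instance

-- ===== CLAIM (what is proved, stated in full; the proofs are below) =====
def Claim_equal_parse_decision_py : Prop := ∀ (response : String), Dom_parse_decision_py response → Spec_parse_decision_py response (parse_decision_py response)

-- ===== LEMMAS AND PROOFS =====

-- the reasons A ends with, entered with in_reasons = False: everything after the first REASONS: line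
def pdAfter : List String → List String
  | [] => []
  | m :: t => if PySem.Str.startswith (PySem.Str.upper m) "REASONS:" then pdCollect t else pdAfter t

lemma pd_upper_head {l : List Char} {c d : Char} {p q : List Char}
    (h : (c :: p) <+: PySem.Chars.upper l) (h2 : (d :: q) <+: l) :
    PySem.Chars.upperChar d = c := by
  obtain ⟨u, hu⟩ := h2
  obtain ⟨t, ht⟩ := h
  rw [← hu] at ht
  simp only [List.cons_append] at ht
  have hup : PySem.Chars.upper (d :: (q ++ u)) =
      PySem.Chars.upperChar d :: PySem.Chars.upper (q ++ u) := rfl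
  rw [hup] at ht
  exact (List.cons.injEq _ _ _ _ ▸ ht).1.symm

lemma pd_dec_not_res {s : String}
    (h : PySem.Str.startswith (PySem.Str.upper s) "DECISION:" = true) :
    PySem.Str.startswith (PySem.Str.upper s) "REASONS:" = false := by
  by_contra hc
  rw [Bool.not_eq_false] at hc
  simp only [PySem.Str.startswith_eq, PySem.Str.toList_upper] at h hc
  rw [PySem.Chars.startswith_iff] at h hc
  rcases List.prefix_or_prefix_of_prefix h hc with h' | h'
  · exact absurd h' (by decide)
  · exact absurd h' (by decide)

lemma pd_upper_not_dash {s : String} {c : Char} {p : List Char}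
    (hne : PySem.Chars.upperChar '-' ≠ c)
    (h : (c :: p) <+: PySem.Chars.upper s.toList) :
    PySem.Str.startswith s "-" = false := by
  by_contra hc
  rw [Bool.not_eq_false] at hc
  simp only [PySem.Str.startswith_eq] at hc
  rw [PySem.Chars.startswith_iff] at hc
  have hdash : ("-" : String).toList = '-' :: ([] : List Char) := rfl
  rw [hdash] at hc
  exact hne (pd_upper_head h hc)

lemma pd_dec_not_dash {s : String}
    (h : PySem.Str.startswith (PySem.Str.upper s) "DECISION:" = true) :
    PySem.Str.startswith s "-" = false := by
  simp only [PySem.Str.startswith_eq, PySem.Str.toList_upper] at h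
  rw [PySem.Chars.startswith_iff] at h
  have hsh : ("DECISION:" : String).toList = 'D' :: ("ECISION:" : String).toList := rfl
  rw [hsh] at h
  exact pd_upper_not_dash (by decide) h

lemma pd_res_not_dash {s : String}
    (h : PySem.Str.startswith (PySem.Str.upper s) "REASONS:" = true) :
    PySem.Str.startswith s "-" = false := by
  simp only [PySem.Str.startswith_eq, PySem.Str.toList_upper] at h
  rw [PySem.Chars.startswith_iff] at h
  have hsh : ("REASONS:" : String).toList = 'R' :: ("EASONS:" : String).toList := rfl
  rw [hsh] at h
  exact pd_upper_not_dash (by decide) h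

lemma pd_fold_fst : ∀ (ms : List String) (d : String) (rs : List String) (flag : Bool),
    (ms.foldl pdStepCore (d, rs, flag)).1 = ms.foldl pdDecStep d := by
  intro ms
  induction ms with
  | nil => intro d rs flag; rfl
  | cons m t ih =>
    intro d rs flag
    simp only [List.foldl_cons]
    by_cases h1 : PySem.Str.startswith (PySem.Str.upper m) "DECISION:" = true
    · simp only [pdStepCore, pdDecStep, h1, if_true]
      split_ifs <;> exact ih _ _ _
    · simp only [pdStepCore, pdDecStep, h1, if_false, Bool.false_eq_true]
      split_ifs <;> exact ih _ _ _

lemma pd_collect_cons_neg {m : String} {t : List String}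
    (h : PySem.Str.startswith m "-" = false) : pdCollect (m :: t) = pdCollect t := by
  have h' : PySem.Chars.startswith m.toList ['-'] = false := by simpa using h
  simp [pdCollect, h']

lemma pd_collect_cons_pos {m : String} {t : List String}
    (h : PySem.Str.startswith m "-" = true) :
    pdCollect (m :: t) = PySem.Str.strip (PySem.Str.slice m (some 1) none) :: pdCollect t := by
  have h' : PySem.Chars.startswith m.toList ['-'] = true := by simpa using h
  simp [pdCollect, h']

lemma pd_after_cons_pos {m : String} {t : List String}
    (h : PySem.Str.startswith (PySem.Str.upper m) "REASONS:" = true) :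
    pdAfter (m :: t) = pdCollect t := by
  simp only [pdAfter, h, if_true]

lemma pd_after_cons_neg {m : String} {t : List String}
    (h : PySem.Str.startswith (PySem.Str.upper m) "REASONS:" = false) :
    pdAfter (m :: t) = pdAfter t := by
  simp only [pdAfter, h, Bool.false_eq_true, if_false]

lemma pd_fold_snd : ∀ (ms : List String) (d : String) (rs : List String) (flag : Bool),
    (ms.foldl pdStepCore (d, rs, flag)).2.1 =
      rs ++ (if flag then pdCollect ms else pdAfter ms) := by
  intro ms
  induction ms with
  | nil => intro d rs flag; cases flag <;> simp [pdAfter, pdCollect]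
  | cons m t ih =>
    intro d rs flag
    simp only [List.foldl_cons]
    by_cases h1 : PySem.Str.startswith (PySem.Str.upper m) "DECISION:" = true
    · have hc := pd_collect_cons_neg (t := t) (pd_dec_not_dash h1)
      have ha := pd_after_cons_neg (t := t) (pd_dec_not_res h1)
      simp only [pdStepCore, h1, if_true]
      rw [hc, ha]
      split_ifs <;> rw [ih] <;> simp_all
    · by_cases h2 : PySem.Str.startswith (PySem.Str.upper m) "REASONS:" = true
      · have hc := pd_collect_cons_neg (t := t) (pd_res_not_dash h2)
        have ha := pd_after_cons_pos (t := t) h2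
        simp only [pdStepCore, h1, h2, if_true, if_false, Bool.false_eq_true]
        rw [ih]
        cases flag <;> rw [hc, ha] <;> simp
      · have ha := pd_after_cons_neg (t := t) (Bool.not_eq_true _ ▸ h2)
        simp only [pdStepCore, h1, h2, if_false, Bool.false_eq_true]
        cases flag with
        | false =>
          simp only [Bool.false_and, Bool.false_eq_true, if_false]
          rw [ih, ha]
          simp
        | true =>
          by_cases hd : PySem.Str.startswith m "-" = true
          · have hcc := pd_collect_cons_pos (t := t) hd
            simp only [Bool.true_and, hd, if_true]
            rw [ih, hcc]
            simp
          · have hc := pd_collect_cons_neg (t := t) (Bool.not_eq_true _ ▸ hd)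
            simp only [Bool.true_and, hd, Bool.false_eq_true, if_false]
            rw [ih, hc]
            simp

lemma pd_after_eq : ∀ ms : List String,
    (match ms.findIdx? (fun s => PySem.Str.startswith (PySem.Str.upper s) "REASONS:") with
     | none => ([] : List String)
     | some i => pdCollect (ms.drop (i + 1))) = pdAfter ms := by
  intro ms
  induction ms with
  | nil => rfl
  | cons m t ih =>
    rw [List.findIdx?_cons]
    by_cases h : PySem.Str.startswith (PySem.Str.upper m) "REASONS:" = true
    · rw [if_pos h, pd_after_cons_pos h]; simp
    · rw [if_neg h, pd_after_cons_neg (Bool.not_eq_true _ ▸ h), ← ih]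
      cases hfi : t.findIdx? (fun s => PySem.Str.startswith (PySem.Str.upper s) "REASONS:") with
      | none => simp
      | some i => simp

-- ===== VERDICT (by name: the statement is the Claim_ definition above) =====
theorem parse_decision_py_spec : Claim_equal_parse_decision_py := by
  intro response _
  unfold Spec_parse_decision_py parse_decision_py parse_decision_py_alt
  dsimp only
  have hfold : (PySem.Str.splitlines (PySem.Str.strip response)).foldl pdStepA ("UNKNOWN", ([], false))
      = ((PySem.Str.splitlines (PySem.Str.strip response)).map PySem.Str.strip).foldl pdStepCore
          ("UNKNOWN", ([], false)) := by
    rw [List.foldl_map]; rfl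
  rw [hfold]
  generalize (PySem.Str.splitlines (PySem.Str.strip response)).map PySem.Str.strip = ms
  refine Prod.ext ?_ ?_
  · dsimp only
    rw [pd_fold_fst]
  · dsimp only
    rw [pd_fold_snd, ← pd_after_eq]
    simp
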